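-- pv_equiv track=rewrite | github.com/EarthSciML/EarthSciSerialization | packages/earthsci_toolkit/src/earthsci_toolkit/migration.py | get_supported_migration_targets
-- ===== SOURCE A (Python) =====
-- from typing import Any, Dict, List, Tuple
--
-- class MigrationError(Exception):
--     """Error raised when migration fails."""
--
--     def __init__(self, message: str, from_version: str = "", to_version: str = ""):
--         self.from_version = from_version
--         self.to_version = to_version
--         super().__init__(
--             f"Migration error: {message} ({from_version} -> {to_version})"
--             if from_version
--             else f"Migration error: {message}"
--         )
--
-- def _parse_version(version: str) -> Tuple[int, int, int]:
--     """Parse a semantic version string into (major, minor, patch)."""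
--     parts = version.split(".")
--     if len(parts) != 3:
--         raise MigrationError(f"Invalid version format: {version}", version, "")
--     try:
--         return (int(parts[0]), int(parts[1]), int(parts[2]))
--     except ValueError:
--         raise MigrationError(f"Invalid version format: {version}", version, "")
--
-- def _compare_versions(a: str, b: str) -> int:
--     """Compare two semantic versions. Returns <0 if a<b, 0 if equal, >0 if a>b."""
--     va = _parse_version(a)
--     vb = _parse_version(b)
--     if va < vb:
--         return -1
--     elif va > vb:
--         return 1
--     return 0
--
-- def get_supported_migration_targets(from_version: str) -> List[str]:
--     """Get supported migration target versions from a given version.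
--
--     Args:
--         from_version: Source version string.
--
--     Returns:
--         List of supported target version strings.
--     """
--     try:
--         from_ver = _parse_version(from_version)
--     except MigrationError:
--         return []
--
--     targets = []
--
--     if from_ver[0] == 0:
--         if from_ver[1] == 0:
--             targets.append("0.1.0")
--         if from_ver[1] <= 1:
--             targets.extend(["0.1.0", "0.1.1", "0.2.0"])
--
--     # Filter to only versions later than from_version, deduplicate
--     seen = set()
--     result = []
--     for target in targets:
--         if target not in seen and _compare_versions(from_version, target) < 0:
--             seen.add(target)
--             result.append(target)
--
--     return result
-- ===== SOURCE B (Python) =====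
-- from typing import List, Tuple
--
-- class MigrationError(Exception):
--     """Error raised when migration fails."""
--
--     def __init__(self, message: str, from_version: str = "", to_version: str = ""):
--         self.from_version = from_version
--         self.to_version = to_version
--         super().__init__(
--             f"Migration error: {message} ({from_version} -> {to_version})"
--             if from_version
--             else f"Migration error: {message}"
--         )
--
-- def _parse_version(version: str) -> Tuple[int, int, int]:
--     parts = version.split(".")
--     if len(parts) != 3:
--         raise MigrationError(f"Invalid version format: {version}", version, "")
--     try:
--         return (int(parts[0]), int(parts[1]), int(parts[2]))
--     except ValueError:
--         raise MigrationError(f"Invalid version format: {version}", version, "")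
--
-- # the complete target table, with the parsed tuple precomputed next to each name
-- TARGETS = [((0, 1, 0), "0.1.0"), ((0, 1, 1), "0.1.1"), ((0, 2, 0), "0.2.0")]
--
-- def get_supported_migration_targets(from_version: str) -> List[str]:
--     try:
--         ver = _parse_version(from_version)
--     except MigrationError:
--         return []
--     # migrations are only defined from the 0.0.x / 0.1.x lines
--     if ver[0] != 0 or ver[1] > 1:
--         return []
--     return [name for (t, name) in TARGETS if ver < t]
-- ===== Notes on version B (the rewrite author's own statement) =====
-- stated objective: simpler
-- what changed: B parses the source version once and replaces A's nested branch-built target list plus seen-set dedup loop by a single guard (major==0 and minor<=1) followed by one tuple-ordering filter over a fixed table of (parsed tuple, name) targets, with no string re-parsing and no dedup state.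
import Mathlib
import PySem

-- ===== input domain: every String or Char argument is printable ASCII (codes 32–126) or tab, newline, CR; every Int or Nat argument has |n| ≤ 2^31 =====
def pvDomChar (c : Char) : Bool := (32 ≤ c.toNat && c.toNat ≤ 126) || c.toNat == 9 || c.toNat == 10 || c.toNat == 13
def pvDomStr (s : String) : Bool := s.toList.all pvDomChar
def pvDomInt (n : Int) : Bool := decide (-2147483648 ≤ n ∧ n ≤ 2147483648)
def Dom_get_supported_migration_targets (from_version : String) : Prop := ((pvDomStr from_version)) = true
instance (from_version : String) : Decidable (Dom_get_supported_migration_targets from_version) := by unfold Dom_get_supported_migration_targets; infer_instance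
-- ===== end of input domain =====

-- B replaces A's nested branch-built target list and seen-set dedup loop by a single
-- guard plus one tuple-ordering filter over a fixed parsed target table (objective: simpler).

-- ===== PORT A =====
-- _parse_version: returns none exactly where the Python raises MigrationError
def pvParseVersion? (version : String) : Option (Int × Int × Int) :=
  -- version.split("."): sep "." ≠ "" so split? is always some; getD [] is never taken
  let parts := (PySem.Str.split? version ".").getD []
  if parts.length = 3 then
    match PySem.Int.ofStr? (parts[0]!), PySem.Int.ofStr? (parts[1]!), PySem.Int.ofStr? (parts[2]!) with
    | some a, some b, some c => some (a, b, c)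
    | _, _, _ => none
  else none

-- Python tuple '<' on (major, minor, patch): lexicographic
def pvTupLt (x y : Int × Int × Int) : Bool :=
  decide (x.1 < y.1 ∨ (x.1 = y.1 ∧ (x.2.1 < y.2.1 ∨ (x.2.1 = y.2.1 ∧ x.2.2 < y.2.2))))

-- _compare_versions: none exactly where either parse raises (never hit inside A's use here)
def pvCompareVersions? (a b : String) : Option Int :=
  match pvParseVersion? a, pvParseVersion? b with
  | some va, some vb => some (if pvTupLt va vb then -1 else if pvTupLt vb va then 1 else 0)
  | _, _ => none

def get_supported_migration_targets (from_version : String) : List String :=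
  match pvParseVersion? from_version with
  | none => []  -- except MigrationError: return []
  | some from_ver =>
    let targets : List String :=
      if from_ver.1 = 0 then
        (if from_ver.2.1 = 0 then ["0.1.0"] else []) ++
        (if from_ver.2.1 ≤ 1 then ["0.1.0", "0.1.1", "0.2.0"] else [])
      else []
    -- for target in targets: seen-set dedup + "later than from_version" filter
    -- (the compare here cannot raise: from_version parsed above, targets are literals)
    let st := targets.foldl
      (fun (st : PySem.Set String × List String) target =>
        if (! PySem.Set.contains st.1 target) &&
            (match pvCompareVersions? from_version target with
             | some c => decide (c < 0)
             | none => false) then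
          (PySem.Set.add st.1 target, st.2 ++ [target])
        else st)
      (PySem.Set.empty, [])
    st.2

-- ===== PORT B =====
-- the complete target table, with the parsed tuple precomputed next to each name
def pvTargets : List ((Int × Int × Int) × String) :=
  [((0, 1, 0), "0.1.0"), ((0, 1, 1), "0.1.1"), ((0, 2, 0), "0.2.0")]

def get_supported_migration_targets_alt (from_version : String) : List String :=
  match pvParseVersion? from_version with
  | none => []  -- except MigrationError: return []
  | some ver =>
    -- migrations are only defined from the 0.0.x / 0.1.x lines
    if ver.1 ≠ 0 ∨ ver.2.1 > 1 then []
    else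
      -- [name for (t, name) in TARGETS if ver < t]
      pvTargets.filterMap (fun p => if pvTupLt ver p.1 then some p.2 else none)

-- ===== PRECONDITION & SPEC =====
def Spec_get_supported_migration_targets (from_version : String) (out : List String) : Prop := out = get_supported_migration_targets_alt from_version
instance (from_version : String) (out : List String) : Decidable (Spec_get_supported_migration_targets from_version out) := by unfold Spec_get_supported_migration_targets; infer_instance

-- ===== CLAIM (what is proved, stated in full; the proofs are below) =====
def Claim_equal_get_supported_migration_targets : Prop := ∀ (from_version : String), Dom_get_supported_migration_targets from_version → Spec_get_supported_migration_targets from_version (get_supported_migration_targets from_version)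

-- ===== LEMMAS AND PROOFS =====
theorem pvParse_lit_010 : pvParseVersion? "0.1.0" = some (0, 1, 0) := by decide
theorem pvParse_lit_011 : pvParseVersion? "0.1.1" = some (0, 1, 1) := by decide
theorem pvParse_lit_020 : pvParseVersion? "0.2.0" = some (0, 2, 0) := by decide

-- a comparison result of 0 or 1 is never < 0
theorem pvPosCond (bb : Bool) : ((if bb then (1 : Int) else 0) < 0) = False := by
  cases bb <;> simp

-- ===== VERDICT (by name: the statement is the Claim_ definition above) =====
theorem get_supported_migration_targets_spec : Claim_equal_get_supported_migration_targets := by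
  intro fv _
  unfold Spec_get_supported_migration_targets
  unfold get_supported_migration_targets get_supported_migration_targets_alt
  cases h : pvParseVersion? fv with
  | none => simp
  | some v =>
    obtain ⟨a, b, c⟩ := v
    have hcmp : ∀ (t : String) (vt : Int × Int × Int), pvParseVersion? t = some vt →
        pvCompareVersions? fv t =
          some (if pvTupLt (a, b, c) vt then -1 else if pvTupLt vt (a, b, c) then 1 else 0) := by
      intro t vt ht
      simp [pvCompareVersions?, h, ht]
    by_cases ha : a = 0
    · subst ha
      by_cases hb1 : b ≤ 1
      · -- guard false on the B side; A's targets dedup to the full list; both sides are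
        -- the same selection by the three comparison bits, whatever they are
        have hb1' : ¬ b > 1 := by omega
        rcases eq_or_ne b 0 with hb0 | hb0
        · subst hb0
          cases e1 : pvTupLt ((0 : Int), 0, c) (0, 1, 0) <;>
            cases e2 : pvTupLt ((0 : Int), 0, c) (0, 1, 1) <;>
              cases e3 : pvTupLt ((0 : Int), 0, c) (0, 2, 0) <;>
                simp [pvTargets, List.foldl, List.filterMap, PySem.Set.contains,
                  PySem.Set.add, PySem.Set.empty, hcmp _ _ pvParse_lit_010,
                  hcmp _ _ pvParse_lit_011, hcmp _ _ pvParse_lit_020, pvPosCond,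
                  e1, e2, e3, hb1']
        · cases e1 : pvTupLt ((0 : Int), b, c) (0, 1, 0) <;>
            cases e2 : pvTupLt ((0 : Int), b, c) (0, 1, 1) <;>
              cases e3 : pvTupLt ((0 : Int), b, c) (0, 2, 0) <;>
                simp [pvTargets, List.foldl, List.filterMap, PySem.Set.contains,
                  PySem.Set.add, PySem.Set.empty, hcmp _ _ pvParse_lit_010,
                  hcmp _ _ pvParse_lit_011, hcmp _ _ pvParse_lit_020, pvPosCond,
                  e1, e2, e3, hb0, hb1, hb1']
      · -- a = 0, b ≥ 2: A's targets = []; B's guard returns []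
        have hb0 : b ≠ 0 := by omega
        have hb1' : b > 1 := by omega
        simp [hb0, hb1, hb1']
    · -- a ≠ 0: A's targets = []; B's guard returns []
      simp [ha]
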